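-- pv_equiv track=rewrite | github.com/helix-drop/OCRandTranslation | persistence/storage_endnotes.py | _resolve_heading_toc_match
-- ===== SOURCE A (Python) =====
-- def _resolve_heading_toc_match(pe: dict, bp: int, toc_depth_map: dict) -> tuple[int, int] | None:
--     if not toc_depth_map:
--         return None
--     probes: list[int] = []
--     start_bp = pe.get("_startBP")
--     if start_bp is not None:
--         try:
--             probes.append(int(start_bp))
--         except (TypeError, ValueError):
--             pass
--     try:
--         probes.append(int(bp))
--     except (TypeError, ValueError):
--         pass
--     probes = [probe for probe in probes if probe > 0]
--     seen = set()
--     probes = [probe for probe in probes if not (probe in seen or seen.add(probe))]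
--     for probe in probes:
--         depth = toc_depth_map.get(probe)
--         if depth is not None:
--             return int(probe), int(depth)
--     keys = sorted(int(key) for key in toc_depth_map.keys())
--     best_depth = None
--     best_dist = None
--     for probe in probes:
--         for key in keys:
--             dist = abs(int(key) - int(probe))
--             if best_dist is None or dist < best_dist:
--                 best_dist = dist
--                 best_depth = int(toc_depth_map[key])
--     if best_dist is not None and best_dist <= 1 and best_depth is not None:
--         nearest_bp = None
--         for probe in probes:
--             for key in keys:
--                 if abs(int(key) - int(probe)) == best_dist:
--                     nearest_bp = int(key)
--                     break
--             if nearest_bp is not None: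
--                 break
--         if nearest_bp is not None:
--             return nearest_bp, best_depth
--     return None
-- ===== SOURCE B (Python) =====
-- def _resolve_heading_toc_match(pe: dict, bp: int, toc_depth_map: dict) -> tuple[int, int] | None:
--     # Near-match can only succeed at distance 1, and distance 0 is the exact phase,
--     # so probe the two neighbouring keys directly instead of sorting and scanning all keys.
--     if not toc_depth_map:
--         return None
--     start_bp = pe.get("_startBP")
--     probes = [int(start_bp), int(bp)] if start_bp is not None else [int(bp)]
--     for probe in probes:
--         if probe > 0 and probe in toc_depth_map:
--             return probe, int(toc_depth_map[probe])
--     for probe in probes: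
--         if probe <= 0:
--             continue
--         for key in (probe - 1, probe + 1):
--             if key in toc_depth_map:
--                 return key, int(toc_depth_map[key])
--     return None
-- ===== Notes on version B (the rewrite author's own statement) =====
-- stated objective: faster
-- what changed: The near-match phase no longer sorts the keys and scans them all per probe tracking a best distance: since the exact phase rules out distance 0 and a near-match needs distance <= 1, B just looks up probe-1 and probe+1 directly in the dict for each probe in order.
import Mathlib
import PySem

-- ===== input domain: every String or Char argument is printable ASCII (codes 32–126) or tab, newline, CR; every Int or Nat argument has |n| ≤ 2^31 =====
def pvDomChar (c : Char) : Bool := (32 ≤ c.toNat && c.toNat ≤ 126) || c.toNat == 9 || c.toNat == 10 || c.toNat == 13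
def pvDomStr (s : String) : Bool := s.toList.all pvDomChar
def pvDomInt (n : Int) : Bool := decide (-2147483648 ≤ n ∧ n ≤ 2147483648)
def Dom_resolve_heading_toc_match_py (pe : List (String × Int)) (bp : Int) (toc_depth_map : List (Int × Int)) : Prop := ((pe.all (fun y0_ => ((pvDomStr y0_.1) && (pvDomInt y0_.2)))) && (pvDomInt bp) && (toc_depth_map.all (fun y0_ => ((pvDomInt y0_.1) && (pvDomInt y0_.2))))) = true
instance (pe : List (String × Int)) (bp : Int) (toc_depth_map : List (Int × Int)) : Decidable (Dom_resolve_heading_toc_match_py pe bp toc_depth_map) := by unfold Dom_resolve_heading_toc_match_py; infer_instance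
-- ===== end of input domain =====

-- B replaces A's sort-all-keys near-match scan by direct dict lookups of probe-1 and probe+1.

-- ===== PORT A =====
-- exact-match loop: 'for probe in probes: depth = toc_depth_map.get(probe); if depth is not None: return int(probe), int(depth)'
def pvExactA (toc : PySem.Dict Int Int) : List Int → Option (Int × Int)
  | [] => none
  | p :: rest =>
    match toc.get? p with
    | some depth => some (p, depth)
    | none => pvExactA toc rest

-- body of the nested best-distance loop: update (best_dist, best_depth) when best_dist is None or dist < best_dist
def pvBestStep (toc : PySem.Dict Int Int) (p : Int) (s : Option Int × Option Int) (k : Int) : Option Int × Option Int :=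
  let dist := |k - p|
  match s.1 with
  | none => (some dist, some (toc.getD k 0))
  | some b => if dist < b then (some dist, some (toc.getD k 0)) else s

-- 'for probe in probes: for key in keys: if abs(key - probe) == best_dist: nearest_bp = key; break; if nearest_bp is not None: break'
def pvNearestA (keys : List Int) (bestDist : Int) : List Int → Option Int
  | [] => none
  | p :: rest =>
    match keys.find? (fun k => |k - p| == bestDist) with
    | some k => some k
    | none => pvNearestA keys bestDist rest

-- everything after the exact loop fails: sorted keys, nested best-distance scan, nearest_bp search, the dist <= 1 gate
def pvNearPhaseA (toc : PySem.Dict Int Int) (probes : List Int) : Option (Int × Int) :=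
  let keys := PySem.List.sorted toc.keys (fun k => k) false
  let best := probes.foldl (fun s p => keys.foldl (pvBestStep toc p) s) (none, none)
  match best with
  | (some bd, some bdep) =>
    if bd ≤ 1 then
      match pvNearestA keys bd probes with
      | some nb => some (nb, bdep)
      | none => none
    else none
  | _ => none

def resolve_heading_toc_match_py (pe : List (String × Int)) (bp : Int) (toc_depth_map : List (Int × Int)) : Option (Int × Int) :=
  let toc := PySem.Dict.ofList toc_depth_map
  if toc.size = 0 then none
  else
    let probes0 : List Int :=
      match (PySem.Dict.ofList pe).get? "_startBP" with
      | some sb => [sb, bp]   -- int() of an int is that int; the except branches never fire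
      | none => [bp]
    let probes1 := probes0.filter (fun p => 0 < p)
    let probes := PySem.List.dedup probes1   -- the 'seen' set keeps first occurrences
    match pvExactA toc probes with
    | some r => some r
    | none => pvNearPhaseA toc probes

-- ===== PORT B =====
def pvExactB (toc : PySem.Dict Int Int) : List Int → Option (Int × Int)
  | [] => none
  | p :: rest =>
    if p ≤ 0 then pvExactB toc rest
    else
      match toc.get? p with
      | some d => some (p, d)
      | none => pvExactB toc rest

def pvNearB (toc : PySem.Dict Int Int) : List Int → Option (Int × Int)
  | [] => none
  | p :: rest =>
    if p ≤ 0 then pvNearB toc rest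
    else
      match toc.get? (p - 1) with
      | some d => some (p - 1, d)
      | none =>
        match toc.get? (p + 1) with
        | some d => some (p + 1, d)
        | none => pvNearB toc rest

def resolve_heading_toc_match_py_alt (pe : List (String × Int)) (bp : Int) (toc_depth_map : List (Int × Int)) : Option (Int × Int) :=
  let toc := PySem.Dict.ofList toc_depth_map
  if toc.size = 0 then none
  else
    let probes : List Int :=
      match (PySem.Dict.ofList pe).get? "_startBP" with
      | some sb => [sb, bp]
      | none => [bp]
    match pvExactB toc probes with
    | some r => some r
    | none => pvNearB toc probes

-- ===== PRECONDITION & SPEC =====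
def Spec_resolve_heading_toc_match_py (pe : List (String × Int)) (bp : Int) (toc_depth_map : List (Int × Int)) (out : Option (Int × Int)) : Prop := out = resolve_heading_toc_match_py_alt pe bp toc_depth_map
instance (pe : List (String × Int)) (bp : Int) (toc_depth_map : List (Int × Int)) (out : Option (Int × Int)) : Decidable (Spec_resolve_heading_toc_match_py pe bp toc_depth_map out) := by unfold Spec_resolve_heading_toc_match_py; infer_instance

-- ===== CLAIM (what is proved, stated in full; the proofs are below) =====
def Claim_equal_resolve_heading_toc_match_py : Prop := ∀ (pe : List (String × Int)) (bp : Int) (toc_depth_map : List (Int × Int)), Dom_resolve_heading_toc_match_py pe bp toc_depth_map → Spec_resolve_heading_toc_match_py pe bp toc_depth_map (resolve_heading_toc_match_py pe bp toc_depth_map)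

-- ===== LEMMAS AND PROOFS =====

theorem pvDedup_one (a : Int) : PySem.List.dedup [a] = [a] := by
  simp [PySem.List.dedup, PySem.Set.ofList, PySem.Set.add]

theorem pvDedup_two (a b : Int) (h : a ≠ b) : PySem.List.dedup [a, b] = [a, b] := by
  simp [PySem.List.dedup, PySem.Set.ofList, PySem.Set.add, Ne.symm h]

theorem pvDedup_dup (a : Int) : PySem.List.dedup [a, a] = [a] := by
  simp [PySem.List.dedup, PySem.Set.ofList, PySem.Set.add]

-- the sorted key list of a dict with Nodup keys is strictly increasing
theorem pvK_pairwise (toc : PySem.Dict Int Int) (hnd : toc.keys.Nodup) :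
    (PySem.List.sorted toc.keys (fun k => k) false).Pairwise (· < ·) := by
  have hle := PySem.List.sorted_pairwise (xs := toc.keys) (key := fun k : Int => k)
  have hnd' : (PySem.List.sorted toc.keys (fun k : Int => k) false).Nodup :=
    hnd.perm (PySem.List.sorted_perm (xs := toc.keys) (key := fun k : Int => k) (rev := false)).symm
  exact (hle.and hnd').imp (fun h => lt_of_le_of_ne h.1 h.2)

-- keys at distance ≥ 1 from an absent probe
theorem pvKdist_ge1 (toc : PySem.Dict Int Int) (p : Int) (hpk : p ∉ toc.keys) :
    ∀ k ∈ PySem.List.sorted toc.keys (fun k => k) false, 1 ≤ |k - p| := by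
  intro k hk
  have hm : k ∈ toc.keys := (PySem.List.mem_sorted _ _ _ _).mp hk
  have : k ≠ p := fun h => hpk (h ▸ hm)
  exact Int.one_le_abs (by omega)

-- no neighbour present: every key is at distance ≥ 2
theorem pvKdist_all2 (toc : PySem.Dict Int Int) (p : Int) (hpk : p ∉ toc.keys)
    (hm1 : (p - 1) ∉ toc.keys) (hp1 : (p + 1) ∉ toc.keys) :
    ∀ k ∈ PySem.List.sorted toc.keys (fun k => k) false, 2 ≤ |k - p| := by
  intro k hk
  have hm : k ∈ toc.keys := (PySem.List.mem_sorted _ _ _ _).mp hk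
  have h0 : k ≠ p := fun h => hpk (h ▸ hm)
  have ha : k ≠ p - 1 := fun h => hm1 (h ▸ hm)
  have hb : k ≠ p + 1 := fun h => hp1 (h ▸ hm)
  by_cases h : k ≤ p
  · rw [abs_sub_comm, abs_of_pos (by omega)]; omega
  · rw [abs_of_pos (by omega)]; omega

-- lower-bound invariant of the best-distance fold
theorem pvBest_lb (toc : PySem.Dict Int Int) (p c : Int) :
    ∀ (l : List Int), (∀ k ∈ l, c ≤ |k - p|) →
    ∀ s : Option Int × Option Int, (s.1 = none ∨ ∃ b, s.1 = some b ∧ c ≤ b) →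
      ((l.foldl (pvBestStep toc p) s).1 = none ∨
        ∃ b, (l.foldl (pvBestStep toc p) s).1 = some b ∧ c ≤ b) := by
  intro l
  induction l with
  | nil => intro _ s hs; exact hs
  | cons k rest ih =>
    intro hl s hs
    rw [List.foldl_cons]
    apply ih (fun x hx => hl x (List.mem_cons_of_mem _ hx))
    have hk := hl k (List.mem_cons_self ..)
    rcases hs with h | ⟨b, hb, hcb⟩
    · right; exact ⟨|k - p|, by simp [pvBestStep, h], hk⟩
    · by_cases hlt : |k - p| < b
      · right; exact ⟨|k - p|, by simp [pvBestStep, hb, hlt], hk⟩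
      · right; exact ⟨b, by simp [pvBestStep, hb, hlt], hcb⟩

-- absorbing state: once best_dist = 1, keys at distance ≥ 1 never update it
theorem pvBest_absorb (toc : PySem.Dict Int Int) (p : Int) :
    ∀ (l : List Int), (∀ k ∈ l, 1 ≤ |k - p|) → ∀ d : Option Int,
      l.foldl (pvBestStep toc p) (some 1, d) = (some 1, d) := by
  intro l
  induction l with
  | nil => intro _ _; rfl
  | cons k rest ih =>
    intro hl d
    rw [List.foldl_cons]
    have hk := hl k (List.mem_cons_self ..)
    have hnlt : ¬ (|k - p| < 1) := by omega
    have hstep : pvBestStep toc p (some 1, d) k = (some 1, d) := by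
      simp [pvBestStep, hnlt]
    rw [hstep]
    exact ih (fun x hx => hl x (List.mem_cons_of_mem _ hx)) d

-- reaching best_dist = 1 at the first neighbour in sorted order
theorem pvBest_hit (toc : PySem.Dict Int Int) (p n : Int) (hn : |n - p| = 1) :
    ∀ (l1 l2 : List Int), (∀ k ∈ l1, 2 ≤ |k - p|) → (∀ k ∈ l2, 1 ≤ |k - p|) →
    ∀ s : Option Int × Option Int, (s.1 = none ∨ ∃ b, s.1 = some b ∧ 2 ≤ b) →
      (l1 ++ n :: l2).foldl (pvBestStep toc p) s = (some 1, some (toc.getD n 0)) := by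
  intro l1 l2 h1 h2 s hs
  rw [List.foldl_append, List.foldl_cons]
  have hmid := pvBest_lb toc p 2 l1 h1 s hs
  have hstep : pvBestStep toc p (l1.foldl (pvBestStep toc p) s) n
      = (some 1, some (toc.getD n 0)) := by
    rcases hmid with h | ⟨b, hb, hcb⟩
    · simp [pvBestStep, h, hn]
    · have hlt : (1 : Int) < b := by omega
      simp [pvBestStep, hb, hn, hlt]
  rw [hstep]
  exact pvBest_absorb toc p l2 h2 _

theorem pvFind_hit (p n : Int) (hn : |n - p| = 1) :
    ∀ (l1 l2 : List Int), (∀ k ∈ l1, 2 ≤ |k - p|) →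
      (l1 ++ n :: l2).find? (fun k => |k - p| == (1 : Int)) = some n := by
  intro l1
  induction l1 with
  | nil =>
    intro l2 _
    rw [List.nil_append, List.find?_cons_of_pos (by simp [hn])]
  | cons k t ih =>
    intro l2 h1
    have hk := h1 k (List.mem_cons_self ..)
    rw [List.cons_append, List.find?_cons_of_neg (by simp; omega)]
    exact ih l2 (fun x hx => h1 x (List.mem_cons_of_mem _ hx))

theorem pvFind_none (p : Int) (l : List Int) (h : ∀ k ∈ l, 2 ≤ |k - p|) :
    l.find? (fun k => |k - p| == (1 : Int)) = none := by
  rw [List.find?_eq_none]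
  intro x hx
  have := h x hx
  simp; omega

-- split the sorted key list at the neighbour that the near-match selects
theorem pvSplitNeighbor (toc : PySem.Dict Int Int) (hnd : toc.keys.Nodup) (p n : Int)
    (hmem : n ∈ toc.keys) (hn : n = p - 1 ∨ (n = p + 1 ∧ (p - 1) ∉ toc.keys))
    (hpk : p ∉ toc.keys) :
    ∃ l1 l2, PySem.List.sorted toc.keys (fun k => k) false = l1 ++ n :: l2 ∧
      (∀ k ∈ l1, 2 ≤ |k - p|) ∧ (∀ k ∈ l2, 1 ≤ |k - p|) := by
  have hnK : n ∈ PySem.List.sorted toc.keys (fun k => k) false :=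
    (PySem.List.mem_sorted _ _ _ _).mpr hmem
  obtain ⟨l1, l2, hsplit⟩ := List.append_of_mem hnK
  have hpw := pvK_pairwise toc hnd
  rw [hsplit, List.pairwise_append] at hpw
  obtain ⟨_, hpw2, hcross⟩ := hpw
  refine ⟨l1, l2, hsplit, ?_, ?_⟩
  · intro k hk
    have hkn : k < n := hcross k hk n (List.mem_cons_self ..)
    have hkK : k ∈ toc.keys := (PySem.List.mem_sorted _ _ _ _).mp
      (by rw [hsplit]; exact List.mem_append_left _ hk)
    have hknp : k ≠ p := fun h => hpk (h ▸ hkK)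
    rcases hn with rfl | ⟨rfl, hm1⟩
    · rw [abs_sub_comm, abs_of_pos (by omega)]; omega
    · have : k ≠ p - 1 := fun h => hm1 (h ▸ hkK)
      rw [abs_sub_comm, abs_of_pos (by omega)]; omega
  · intro k hk
    have hkK : k ∈ toc.keys := (PySem.List.mem_sorted _ _ _ _).mp
      (by rw [hsplit]; exact List.mem_append_right _ (List.mem_cons_of_mem _ hk))
    have : k ≠ p := fun h => hpk (h ▸ hkK)
    exact Int.one_le_abs (by omega)

-- per-probe summary of the near-match phase: either p has a neighbouring key
-- (the one A's scan selects, with all the facts the main proof needs), or every key is ≥ 2 away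
theorem pvProbe_main (toc : PySem.Dict Int Int) (hnd : toc.keys.Nodup) (p : Int)
    (hp : toc.get? p = none) :
    (∃ n v, toc.get? n = some v ∧ toc.getD n 0 = v ∧
      (n = p - 1 ∨ (n = p + 1 ∧ toc.get? (p - 1) = none)) ∧
      (∀ s : Option Int × Option Int, (s.1 = none ∨ ∃ b, s.1 = some b ∧ 2 ≤ b) →
        (PySem.List.sorted toc.keys (fun k => k) false).foldl (pvBestStep toc p) s
          = (some 1, some v)) ∧
      (PySem.List.sorted toc.keys (fun k => k) false).find? (fun k => |k - p| == (1 : Int))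
        = some n)
    ∨ (toc.get? (p - 1) = none ∧ toc.get? (p + 1) = none ∧
        ∀ k ∈ PySem.List.sorted toc.keys (fun k => k) false, 2 ≤ |k - p|) := by
  have hpk : p ∉ toc.keys := (PySem.Dict.get?_eq_none_iff_not_mem_keys _ _).mp hp
  by_cases h1 : (p - 1) ∈ toc.keys
  · left
    obtain ⟨v, hv⟩ : ∃ v, toc.get? (p - 1) = some v := by
      rcases hgv : toc.get? (p - 1) with _ | v
      · exact absurd ((PySem.Dict.get?_eq_none_iff_not_mem_keys _ _).mp hgv) (not_not_intro h1)
      · exact ⟨v, rfl⟩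
    obtain ⟨l1, l2, hK, ha, hb⟩ := pvSplitNeighbor toc hnd p (p - 1) h1 (Or.inl rfl) hpk
    have habs : |(p - 1) - p| = 1 := by rw [show p - 1 - p = -1 by ring]; decide
    have hgd : toc.getD (p - 1) 0 = v := by
      rw [PySem.Dict.getD_eq_get?_getD, hv]; rfl
    refine ⟨p - 1, v, hv, hgd, Or.inl rfl, ?_, ?_⟩
    · intro s hs
      rw [hK, pvBest_hit toc p (p - 1) habs l1 l2 ha hb s hs, hgd]
    · rw [hK]; exact pvFind_hit p (p - 1) habs l1 l2 ha
  · have hm1 : toc.get? (p - 1) = none :=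
      (PySem.Dict.get?_eq_none_iff_not_mem_keys _ _).mpr h1
    by_cases h2 : (p + 1) ∈ toc.keys
    · left
      obtain ⟨v, hv⟩ : ∃ v, toc.get? (p + 1) = some v := by
        rcases hgv : toc.get? (p + 1) with _ | v
        · exact absurd ((PySem.Dict.get?_eq_none_iff_not_mem_keys _ _).mp hgv) (not_not_intro h2)
        · exact ⟨v, rfl⟩
      obtain ⟨l1, l2, hK, ha, hb⟩ :=
        pvSplitNeighbor toc hnd p (p + 1) h2 (Or.inr ⟨rfl, h1⟩) hpk
      have habs : |(p + 1) - p| = 1 := by rw [show p + 1 - p = 1 by ring]; decide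
      have hgd : toc.getD (p + 1) 0 = v := by
        rw [PySem.Dict.getD_eq_get?_getD, hv]; rfl
      refine ⟨p + 1, v, hv, hgd, Or.inr ⟨rfl, hm1⟩, ?_, ?_⟩
      · intro s hs
        rw [hK, pvBest_hit toc p (p + 1) habs l1 l2 ha hb s hs, hgd]
      · rw [hK]; exact pvFind_hit p (p + 1) habs l1 l2 ha
    · right
      exact ⟨hm1, (PySem.Dict.get?_eq_none_iff_not_mem_keys _ _).mpr h2,
        pvKdist_all2 toc p hpk h1 h2⟩

-- near phase, one positive probe
theorem pvNear_single (toc : PySem.Dict Int Int) (hnd : toc.keys.Nodup) (p : Int)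
    (hp : toc.get? p = none) (hpos : 0 < p) :
    pvNearPhaseA toc [p] = pvNearB toc [p] := by
  have hnp : ¬ p ≤ 0 := by omega
  rcases pvProbe_main toc hnd p hp with ⟨n, v, hv, _, hcase, hfold, hfind⟩ | ⟨hm1, hm2, hall⟩
  · simp only [pvNearPhaseA, List.foldl_cons, List.foldl_nil]
    rw [hfold (none, none) (Or.inl rfl)]
    have hA : pvNearestA (PySem.List.sorted toc.keys (fun k => k) false) 1 [p] = some n := by
      simp [pvNearestA, hfind]
    simp only [hA]
    rcases hcase with rfl | ⟨rfl, hm⟩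
    · simp [pvNearB, hnp, hv]
    · simp [pvNearB, hnp, hm, hv]
  · have hres := pvBest_lb toc p 2 _ hall (none, none) (Or.inl rfl)
    have hB : pvNearB toc [p] = none := by simp [pvNearB, hnp, hm1, hm2]
    simp only [pvNearPhaseA, List.foldl_cons, List.foldl_nil]
    rcases hfold : (PySem.List.sorted toc.keys (fun k => k) false).foldl
        (pvBestStep toc p) (none, none) with ⟨b1, b2⟩
    rw [hfold] at hres
    rcases b1 with _ | b
    · rcases b2 with _ | d <;> simp [hB]
    · rcases hres with h | ⟨b', hb', h2b⟩
      · exact absurd h (by simp)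
      · have hbb : b = b' := by simpa using hb'
        subst hbb
        have : ¬ (b ≤ 1) := by omega
        rcases b2 with _ | d <;> simp [this, hB]

-- near phase, two positive probes
theorem pvNear_pair (toc : PySem.Dict Int Int) (hnd : toc.keys.Nodup) (p q : Int)
    (hp : toc.get? p = none) (hq : toc.get? q = none) (hpp : 0 < p) (hqp : 0 < q) :
    pvNearPhaseA toc [p, q] = pvNearB toc [p, q] := by
  have hnp : ¬ p ≤ 0 := by omega
  have hnq : ¬ q ≤ 0 := by omega
  have hqk : q ∉ toc.keys := (PySem.Dict.get?_eq_none_iff_not_mem_keys _ _).mp hq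
  rcases pvProbe_main toc hnd p hp with ⟨n, v, hv, _, hcase, hfold, hfind⟩ | ⟨hm1, hm2, hall⟩
  · -- p already has a neighbour: q's pass cannot improve best_dist = 1
    simp only [pvNearPhaseA, List.foldl_cons, List.foldl_nil]
    rw [hfold (none, none) (Or.inl rfl),
      pvBest_absorb toc q _ (pvKdist_ge1 toc q hqk) _]
    have hA : pvNearestA (PySem.List.sorted toc.keys (fun k => k) false) 1 [p, q] = some n := by
      simp [pvNearestA, hfind]
    simp only [hA]
    rcases hcase with rfl | ⟨rfl, hm⟩
    · simp [pvNearB, hnp, hv]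
    · simp [pvNearB, hnp, hm, hv]
  · -- p has no neighbour: its pass leaves best_dist ≥ 2 (or None), q decides
    have hs1 := pvBest_lb toc p 2 _ hall (none, none) (Or.inl rfl)
    have hfn := pvFind_none p _ hall
    rcases pvProbe_main toc hnd q hq with ⟨n, v, hv, _, hcase, hfold, hfind⟩ | ⟨hm1', hm2', hall'⟩
    · simp only [pvNearPhaseA, List.foldl_cons, List.foldl_nil]
      rw [hfold _ hs1]
      have hA : pvNearestA (PySem.List.sorted toc.keys (fun k => k) false) 1 [p, q] = some n := by
        simp [pvNearestA, hfn, hfind]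
      simp only [hA]
      rcases hcase with rfl | ⟨rfl, hm⟩
      · simp [pvNearB, hnp, hnq, hm1, hm2, hv]
      · simp [pvNearB, hnp, hnq, hm1, hm2, hm, hv]
    · have hres := pvBest_lb toc q 2 _ hall' _ hs1
      have hB : pvNearB toc [p, q] = none := by
        simp [pvNearB, hnp, hnq, hm1, hm2, hm1', hm2']
      simp only [pvNearPhaseA, List.foldl_cons, List.foldl_nil]
      rcases hfold : (PySem.List.sorted toc.keys (fun k => k) false).foldl (pvBestStep toc q)
          ((PySem.List.sorted toc.keys (fun k => k) false).foldl (pvBestStep toc p)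
            (none, none)) with ⟨b1, b2⟩
      rw [hfold] at hres
      rcases b1 with _ | b
      · rcases b2 with _ | d <;> simp [hB]
      · rcases hres with h | ⟨b', hb', h2b⟩
        · exact absurd h (by simp)
        · have hbb : b = b' := by simpa using hb'
          subst hbb
          have : ¬ (b ≤ 1) := by omega
          rcases b2 with _ | d <;> simp [this, hB]

-- B's loops skip non-positive probes and duplicate heads
theorem pvExactB_skip (toc : PySem.Dict Int Int) (p : Int) (l : List Int) (h : p ≤ 0) :
    pvExactB toc (p :: l) = pvExactB toc l := by simp [pvExactB, h]

theorem pvNearB_skip (toc : PySem.Dict Int Int) (p : Int) (l : List Int) (h : p ≤ 0) :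
    pvNearB toc (p :: l) = pvNearB toc l := by simp [pvNearB, h]

theorem pvExactB_dup (toc : PySem.Dict Int Int) (p : Int) (l : List Int) :
    pvExactB toc (p :: p :: l) = pvExactB toc (p :: l) := by
  by_cases h : p ≤ 0
  · simp [pvExactB, h]
  · cases hg : toc.get? p <;> simp [pvExactB, h, hg]

theorem pvNearB_dup (toc : PySem.Dict Int Int) (p : Int) (l : List Int) :
    pvNearB toc (p :: p :: l) = pvNearB toc (p :: l) := by
  by_cases h : p ≤ 0
  · simp [pvNearB, h]
  · cases hg1 : toc.get? (p - 1) <;> cases hg2 : toc.get? (p + 1) <;>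
      simp [pvNearB, h, hg1, hg2]

theorem pvExactB_snd_nonpos (toc : PySem.Dict Int Int) (a b : Int) (h : b ≤ 0) :
    pvExactB toc [a, b] = pvExactB toc [a] := by
  by_cases ha : a ≤ 0
  · simp [pvExactB, ha, h]
  · cases hg : toc.get? a <;> simp [pvExactB, ha, hg, h]

theorem pvNearB_snd_nonpos (toc : PySem.Dict Int Int) (a b : Int) (h : b ≤ 0) :
    pvNearB toc [a, b] = pvNearB toc [a] := by
  by_cases ha : a ≤ 0
  · simp [pvNearB, ha, h]
  · cases hg1 : toc.get? (a - 1) <;> cases hg2 : toc.get? (a + 1) <;>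
      simp [pvNearB, ha, hg1, hg2, h]

-- whole pipeline after probe normalisation, one resp. two positive probes
theorem pvCombined_single (toc : PySem.Dict Int Int) (hnd : toc.keys.Nodup) (p : Int)
    (hpos : 0 < p) :
    (match pvExactA toc [p] with
     | some r => some r
     | none => pvNearPhaseA toc [p]) =
    (match pvExactB toc [p] with
     | some r => some r
     | none => pvNearB toc [p]) := by
  have hnp : ¬ p ≤ 0 := by omega
  cases hg : toc.get? p with
  | some d => simp [pvExactA, pvExactB, hg, hnp]
  | none =>
    simp only [pvExactA, pvExactB, hg, hnp, if_false]
    exact pvNear_single toc hnd p hg hpos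

theorem pvCombined_pair (toc : PySem.Dict Int Int) (hnd : toc.keys.Nodup) (p q : Int)
    (hpp : 0 < p) (hqp : 0 < q) :
    (match pvExactA toc [p, q] with
     | some r => some r
     | none => pvNearPhaseA toc [p, q]) =
    (match pvExactB toc [p, q] with
     | some r => some r
     | none => pvNearB toc [p, q]) := by
  have hnp : ¬ p ≤ 0 := by omega
  have hnq : ¬ q ≤ 0 := by omega
  cases hg1 : toc.get? p with
  | some d => simp [pvExactA, pvExactB, hg1, hnp]
  | none =>
    cases hg2 : toc.get? q with
    | some d => simp [pvExactA, pvExactB, hg1, hg2, hnp, hnq]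
    | none =>
      simp only [pvExactA, pvExactB, hg1, hg2, hnp, hnq, if_false]
      exact pvNear_pair toc hnd p q hg1 hg2 hpp hqp

-- empty probe list: both sides return None
theorem pvCombined_nil (toc : PySem.Dict Int Int) :
    (match pvExactA toc [] with
     | some r => some r
     | none => pvNearPhaseA toc []) =
    (match pvExactB toc [] with
     | some r => some r
     | none => pvNearB toc []) := by
  simp [pvExactA, pvExactB, pvNearPhaseA, pvNearB]

-- ===== VERDICT (by name: the statement is the Claim_ definition above) =====
theorem resolve_heading_toc_match_py_spec : Claim_equal_resolve_heading_toc_match_py := by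
  intro pe bp toc_depth_map _
  unfold Spec_resolve_heading_toc_match_py
  unfold resolve_heading_toc_match_py resolve_heading_toc_match_py_alt
  by_cases hsize : (PySem.Dict.ofList toc_depth_map).size = 0
  · simp [hsize]
  · simp only [hsize, if_false]
    have hnd : (PySem.Dict.ofList toc_depth_map).keys.Nodup :=
      PySem.Dict.nodup_keys_ofList _
    set toc := PySem.Dict.ofList toc_depth_map with htoc
    rcases hsb : (PySem.Dict.ofList pe).get? "_startBP" with _ | sb
    · -- no _startBP: probes built from bp alone
      by_cases hbp : 0 < bp
      · have hfilter : List.filter (fun p => decide (0 < p)) [bp] = [bp] := by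
          simp [List.filter, hbp]
        simp only [hfilter, pvDedup_one]
        exact pvCombined_single toc hnd bp hbp
      · have hfilter : List.filter (fun p => decide (0 < p)) [bp] = [] := by
          simp [List.filter, hbp]
        simp only [hfilter]
        rw [show PySem.List.dedup ([] : List Int) = [] from rfl]
        rw [pvExactB_skip toc bp [] (by omega), pvNearB_skip toc bp [] (by omega)]
        exact pvCombined_nil toc
    · -- _startBP present: probes = [sb, bp]
      by_cases h1 : 0 < sb <;> by_cases h2 : 0 < bp
      · by_cases heq : sb = bp
        · subst heq
          have hfilter : List.filter (fun p => decide (0 < p)) [sb, sb] = [sb, sb] := by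
            simp [List.filter, h1]
          simp only [hfilter, pvDedup_dup]
          rw [pvExactB_dup toc sb [], pvNearB_dup toc sb []]
          exact pvCombined_single toc hnd sb h1
        · have hfilter : List.filter (fun p => decide (0 < p)) [sb, bp] = [sb, bp] := by
            simp [List.filter, h1, h2]
          simp only [hfilter, pvDedup_two sb bp heq]
          exact pvCombined_pair toc hnd sb bp h1 h2
      · have hfilter : List.filter (fun p => decide (0 < p)) [sb, bp] = [sb] := by
          simp [List.filter, h1, h2]
        simp only [hfilter, pvDedup_one]
        rw [pvExactB_snd_nonpos toc sb bp (by omega), pvNearB_snd_nonpos toc sb bp (by omega)]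
        exact pvCombined_single toc hnd sb h1
      · have hfilter : List.filter (fun p => decide (0 < p)) [sb, bp] = [bp] := by
          simp [List.filter, h1, h2]
        simp only [hfilter, pvDedup_one]
        rw [pvExactB_skip toc sb [bp] (by omega), pvNearB_skip toc sb [bp] (by omega)]
        exact pvCombined_single toc hnd bp h2
      · have hfilter : List.filter (fun p => decide (0 < p)) [sb, bp] = [] := by
          simp [List.filter, h1, h2]
        simp only [hfilter]
        rw [show PySem.List.dedup ([] : List Int) = [] from rfl]
        rw [pvExactB_skip toc sb [bp] (by omega), pvExactB_skip toc bp [] (by omega),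
          pvNearB_skip toc sb [bp] (by omega), pvNearB_skip toc bp [] (by omega)]
        exact pvCombined_nil toc
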